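-- pv_equiv track=rewrite | github.com/zhempstead/sato | test_gpt.py | best_matches
-- ===== SOURCE A (Python) =====
-- def best_matches(arr1, arr2):
--     if min(len(arr1), len(arr2)) == 0:
--         return []
--     if arr2[0].startswith(arr1[0]):
--         matches = best_matches(arr1[1:], arr2[1:])
--         return [(0, 0)] + [(m1+1, m2+1) for m1, m2 in matches]
--     else:
--         matches1 = best_matches(arr1, arr2[1:])
--         matches1 = [(m1, m2+1) for m1, m2 in matches1]
--         matches2 = best_matches(arr1[1:], arr2)
--         matches2 = [(m1+1, m2) for m1, m2 in matches2]
--         if len(matches2) > len(matches1):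
--             return matches2
--         return matches1
-- ===== SOURCE B (Python) =====
-- def best_matches(arr1, arr2):
--     # Bottom-up DP over (i, j) suffix indices: row[j] holds the best alignment
--     # for suffixes arr1[i:], arr2[j:] in absolute indices. O(n*m) subproblems
--     # instead of A's exponential recursion; same tie-break (prefer skipping arr2).
--     m = len(arr2)
--     prev = [[] for _ in range(m + 1)]
--     for i in range(len(arr1) - 1, -1, -1):
--         a = arr1[i]
--         cur = [[]]
--         for j in range(m - 1, -1, -1):
--             if arr2[j].startswith(a):
--                 cell = [(i, j)] + prev[j + 1]
--             else:
--                 down, right = prev[j], cur[0]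
--                 cell = down if len(down) > len(right) else right
--             cur = [cell] + cur
--         prev = cur
--     return prev[0]
-- ===== Notes on version B (the rewrite author's own statement) =====
-- stated objective: faster
-- what changed: Replaced A's exponential top-down recursion (branching on skip-left/skip-right at every mismatch) with a bottom-up dynamic-programming table over suffix index pairs (i,j), filled row by row, with the same tie-break preferring the arr2-skipping branch; intended as faster asymptotically — in a timing run A already timed out at n=16 while B returned, so no ratio could be measured.
import Mathlib
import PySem

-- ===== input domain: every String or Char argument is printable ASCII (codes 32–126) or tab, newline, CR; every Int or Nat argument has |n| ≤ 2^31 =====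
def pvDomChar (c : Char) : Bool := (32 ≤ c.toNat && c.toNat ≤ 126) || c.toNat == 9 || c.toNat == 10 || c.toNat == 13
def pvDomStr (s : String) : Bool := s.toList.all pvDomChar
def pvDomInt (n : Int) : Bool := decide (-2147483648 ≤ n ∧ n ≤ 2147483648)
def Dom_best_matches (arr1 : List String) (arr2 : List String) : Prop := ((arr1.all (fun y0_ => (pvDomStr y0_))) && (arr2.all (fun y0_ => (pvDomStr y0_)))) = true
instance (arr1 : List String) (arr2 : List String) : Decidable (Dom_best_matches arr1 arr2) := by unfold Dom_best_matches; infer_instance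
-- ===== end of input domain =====

-- B replaces A's exponential branching recursion by a bottom-up dynamic program over suffix index pairs (same values, same tie-break); intended as faster (timing: A timed out at n=16 while B returned, no ratio measurable).
-- ===== PORT A =====
def best_matches (arr1 : List String) (arr2 : List String) : List (Int × Int) :=
  match arr1, arr2 with
  | [], _ => []
  | _, [] => []
  | a :: as_, b :: bs =>
    if PySem.Str.startswith b a then
      (0, 0) :: (best_matches as_ bs).map (fun p => (p.1 + 1, p.2 + 1))
    else
      let matches1 := (best_matches (a :: as_) bs).map (fun p => (p.1, p.2 + 1))
      let matches2 := (best_matches as_ (b :: bs)).map (fun p => (p.1 + 1, p.2))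
      if matches2.length > matches1.length then matches2 else matches1
termination_by arr1.length + arr2.length
decreasing_by all_goals (simp only [List.length_cons]; omega)

-- ===== PORT B =====
-- inner loop of Source B: for j from m-1 down to 0, cur = [cell] + cur  (cur starts [[]])
def pvBuildRow (a : String) (i : Int) (bs : List String) (j : Int)
    (prev : List (List (Int × Int))) : List (List (Int × Int)) :=
  match bs, prev with
  | [], _ => [[]]
  | b :: bs', p0 :: prest =>
    let cur := pvBuildRow a i bs' (j + 1) prest
    let cell :=
      if PySem.Str.startswith b a then (i, j) :: prest.headD []
      else
        let down := p0
        let right := cur.headD []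
        if down.length > right.length then down else right
    cell :: cur
  | _ :: _, [] => [[]]   -- unreachable: prev always has length bs.length + 1

-- outer loop of Source B: for i from n-1 down to 0, prev := row i
def pvDpRows (arr2 : List String) : List String → Int → List (List (Int × Int))
  | [], _ => List.replicate (arr2.length + 1) []
  | a :: as_, i => pvBuildRow a i arr2 0 (pvDpRows arr2 as_ (i + 1))

def best_matches_alt (arr1 : List String) (arr2 : List String) : List (Int × Int) :=
  (pvDpRows arr2 arr1 0).headD []

-- ===== PRECONDITION & SPEC =====
def Spec_best_matches (arr1 : List String) (arr2 : List String) (out : List (Int × Int)) : Prop := out = best_matches_alt arr1 arr2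
instance (arr1 : List String) (arr2 : List String) (out : List (Int × Int)) : Decidable (Spec_best_matches arr1 arr2 out) := by unfold Spec_best_matches; infer_instance

-- ===== CLAIM (what is proved, stated in full; the proofs are below) =====
def Claim_equal_best_matches : Prop := ∀ (arr1 : List String) (arr2 : List String), Dom_best_matches arr1 arr2 → Spec_best_matches arr1 arr2 (best_matches arr1 arr2)

-- ===== LEMMAS AND PROOFS =====
-- A's result for the suffix pair, shifted to absolute indices (i, j)
def pvAS (i j : Int) (as_ bs : List String) : List (Int × Int) :=
  (best_matches as_ bs).map (fun p => (p.1 + i, p.2 + j))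

-- the row of all suffix values f(i, j+k) for k = 0 .. bs.length
def pvRowOf (as_ : List String) (i : Int) : List String → Int → List (List (Int × Int))
  | [], j => [pvAS i j as_ []]
  | b :: bs, j => pvAS i j as_ (b :: bs) :: pvRowOf as_ i bs (j + 1)

theorem pvAS_nil (i j : Int) (as_ : List String) : pvAS i j as_ [] = [] := by
  cases as_ <;> simp [pvAS, best_matches]

theorem pvAS_nil' (i j : Int) (bs : List String) : pvAS i j [] bs = [] := by
  cases bs <;> simp [pvAS, best_matches]

theorem pvRowOf_nil (i : Int) (bs : List String) (j : Int) :
    pvRowOf [] i bs j = List.replicate (bs.length + 1) [] := by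
  induction bs generalizing j with
  | nil => simp [pvRowOf, pvAS_nil']
  | cons b bs ih => simp [pvRowOf, pvAS_nil', ih, List.replicate_succ]

theorem pvRowOf_headD (as_ : List String) (i : Int) (bs : List String) (j : Int) :
    (pvRowOf as_ i bs j).headD [] = pvAS i j as_ bs := by
  cases bs <;> simp [pvRowOf]

theorem pvBuildRow_cons (a : String) (i : Int) (b : String) (bs' : List String) (j : Int)
    (p0 : List (Int × Int)) (prest : List (List (Int × Int))) :
    pvBuildRow a i (b :: bs') j (p0 :: prest) =
      (if PySem.Str.startswith b a then (i, j) :: prest.headD []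
       else if p0.length > ((pvBuildRow a i bs' (j + 1) prest).headD []).length then p0
       else (pvBuildRow a i bs' (j + 1) prest).headD [])
      :: pvBuildRow a i bs' (j + 1) prest := rfl

theorem pvAS_step (a : String) (as_ : List String) (i : Int) (b : String) (bs : List String)
    (j : Int) :
    pvAS i j (a :: as_) (b :: bs) =
      if PySem.Str.startswith b a then (i, j) :: pvAS (i + 1) (j + 1) as_ bs
      else
        if (pvAS (i + 1) j as_ (b :: bs)).length > (pvAS i (j + 1) (a :: as_) bs).length
        then pvAS (i + 1) j as_ (b :: bs) else pvAS i (j + 1) (a :: as_) bs := by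
  simp only [pvAS, best_matches]
  split_ifs with h1 h2 h3 h4 <;>
    simp_all [List.map_map, Function.comp, add_comm, add_left_comm] <;> omega

theorem pvBuildRow_spec (a : String) (as_ : List String) (i : Int) :
    ∀ (bs : List String) (j : Int),
      pvBuildRow a i bs j (pvRowOf as_ (i + 1) bs j) = pvRowOf (a :: as_) i bs j := by
  intro bs
  induction bs with
  | nil =>
    intro j
    simp [pvRowOf, pvBuildRow, pvAS_nil]
  | cons b bs ih =>
    intro j
    show pvBuildRow a i (b :: bs) j
        (pvAS (i + 1) j as_ (b :: bs) :: pvRowOf as_ (i + 1) bs (j + 1)) =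
      pvAS i j (a :: as_) (b :: bs) :: pvRowOf (a :: as_) i bs (j + 1)
    rw [pvBuildRow_cons, ih, pvRowOf_headD, pvRowOf_headD, pvAS_step]

theorem pvDpRows_spec (arr2 : List String) :
    ∀ (as_ : List String) (i : Int), pvDpRows arr2 as_ i = pvRowOf as_ i arr2 0 := by
  intro as_
  induction as_ with
  | nil => intro i; simp [pvDpRows, pvRowOf_nil]
  | cons a as_ ih =>
    intro i
    simp only [pvDpRows, ih]
    exact pvBuildRow_spec a as_ i arr2 0

theorem pvAlt_eq (arr1 arr2 : List String) :
    best_matches_alt arr1 arr2 = best_matches arr1 arr2 := by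
  unfold best_matches_alt
  rw [pvDpRows_spec, pvRowOf_headD]
  simp [pvAS]

-- ===== VERDICT (by name: the statement is the Claim_ definition above) =====
theorem best_matches_spec : Claim_equal_best_matches := by
  intro arr1 arr2 _
  unfold Spec_best_matches
  exact (pvAlt_eq arr1 arr2).symm
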